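-- pv_equiv track=rewrite | github.com/queenJiJi/Algorithm_Study | Problems/백트래킹5.py | solution
-- ===== SOURCE A (Python) =====
-- def solution(num, arr):
--   result = []
--
--   def backtrack(tmp):
--
--     if len(tmp) == num:
--       result.append(tmp[:])
--       return
--     for val in arr:
--       if val not in tmp:
--         tmp.append(val)
--         backtrack(tmp)
--         tmp.pop()
--   backtrack([])
--   result.sort()
--   return result
-- ===== SOURCE B (Python) =====
-- def solution(num, arr):
--     if num < 0:
--         return []
--     level = [[]]
--     for _ in range(num):
--         if not level:
--             break
--         level = [p + [v] for p in level for v in arr if v not in p]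
--     level.sort()
--     return level
-- ===== Notes on version B (the rewrite author's own statement) =====
-- stated objective: alternative
-- what changed: Replaced the recursive depth-first backtracking with shared mutable tmp/result by an iterative breadth-first construction: starting from [[]], apply num times a comprehension extending every partial permutation by each still-unused value, then sort.
import Mathlib
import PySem

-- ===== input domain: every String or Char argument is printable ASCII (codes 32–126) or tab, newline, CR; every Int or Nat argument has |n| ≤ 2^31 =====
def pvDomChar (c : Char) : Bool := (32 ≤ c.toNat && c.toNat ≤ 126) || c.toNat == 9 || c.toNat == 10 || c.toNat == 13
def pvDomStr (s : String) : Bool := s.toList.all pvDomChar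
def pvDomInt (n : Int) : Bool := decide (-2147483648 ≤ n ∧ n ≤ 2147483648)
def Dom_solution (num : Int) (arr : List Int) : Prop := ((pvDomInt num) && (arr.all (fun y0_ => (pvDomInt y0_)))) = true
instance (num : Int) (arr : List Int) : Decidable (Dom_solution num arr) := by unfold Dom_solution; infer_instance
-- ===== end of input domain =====

-- B replaces A's recursive DFS backtracking by an iterative level-by-level (BFS) construction; same
-- asymptotic cost (objective: alternative).

-- ===== PORT A =====
-- A's recursive backtrack, with a fuel argument that only makes the recursion total:
-- recursion depth is bounded by the number of distinct values of arr, so fuel = arr.length + 1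
-- is never exhausted (proved in the lemmas below).
mutual
def pvBacktrack (num : Int) (arr : List Int) : Nat → List Int → List (List Int) → List (List Int)
  | 0, _, result => result
  | fuel + 1, tmp, result =>
    if (tmp.length : Int) = num then result ++ [tmp]
    else pvBtLoop num arr fuel tmp arr result
  termination_by fuel _ _ => (fuel, 0)

-- the 'for val in arr' loop inside backtrack
def pvBtLoop (num : Int) (arr : List Int) : Nat → List Int → List Int → List (List Int) → List (List Int)
  | _, _, [], result => result
  | fuel, tmp, val :: vals, result =>
    pvBtLoop num arr fuel tmp vals
      (if val ∈ tmp then result else pvBacktrack num arr fuel (tmp ++ [val]) result)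
  termination_by fuel _ vals _ => (fuel, vals.length + 1)
end

def solution (num : Int) (arr : List Int) : List (List Int) :=
  PySem.List.sorted (pvBacktrack num arr (arr.length + 1) [] []) (fun x => x) false

-- ===== PORT B =====
-- one step of B's loop body: [p + [v] for p in level for v in arr if v not in p]
def pvStep (arr : List Int) (level : List (List Int)) : List (List Int) :=
  level.flatMap (fun p => (arr.filter (fun v => decide (v ∉ p))).map (fun v => p ++ [v]))

-- 'for _ in range(num): if not level: break; level = pvStep level'
def pvLevelsBrk (arr : List Int) : Nat → List (List Int) → List (List Int)
  | 0, level => level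
  | n + 1, level => if level = [] then [] else pvLevelsBrk arr n (pvStep arr level)

def solution_alt (num : Int) (arr : List Int) : List (List Int) :=
  if num < 0 then []
  else PySem.List.sorted (pvLevelsBrk arr num.toNat [[]]) (fun x => x) false

-- ===== PRECONDITION & SPEC =====
def Spec_solution (num : Int) (arr : List Int) (out : List (List Int)) : Prop := out = solution_alt num arr
instance (num : Int) (arr : List Int) (out : List (List Int)) : Decidable (Spec_solution num arr out) := by unfold Spec_solution; infer_instance

-- ===== CLAIM (what is proved, stated in full; the proofs are below) =====
def Claim_equal_solution : Prop := ∀ (num : Int) (arr : List Int), Dom_solution num arr → Spec_solution num arr (solution num arr)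

-- ===== LEMMAS AND PROOFS =====

-- proof-side version of the level iteration without the early exit
def pvLevels (arr : List Int) : Nat → List (List Int) → List (List Int)
  | 0, level => level
  | n + 1, level => pvLevels arr n (pvStep arr level)

theorem pvStep_append (arr : List Int) (ps qs : List (List Int)) :
    pvStep arr (ps ++ qs) = pvStep arr ps ++ pvStep arr qs := by
  simp [pvStep]

theorem pvLevels_append (arr : List Int) :
    ∀ (n : Nat) (ps qs : List (List Int)),
      pvLevels arr n (ps ++ qs) = pvLevels arr n ps ++ pvLevels arr n qs := by
  intro n
  induction n with
  | zero => intro ps qs; rfl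
  | succ m ih => intro ps qs; simp [pvLevels, pvStep_append, ih]

theorem pvLevels_nil (arr : List Int) : ∀ (n : Nat), pvLevels arr n [] = [] := by
  intro n
  induction n with
  | zero => rfl
  | succ m ih => simp [pvLevels, pvStep]; exact ih

theorem pvLevelsBrk_eq (arr : List Int) :
    ∀ (n : Nat) (level : List (List Int)), pvLevelsBrk arr n level = pvLevels arr n level := by
  intro n
  induction n with
  | zero => intro level; rfl
  | succ m ih =>
    intro level
    by_cases h : level = []
    · subst h; simp [pvLevelsBrk, pvLevels, pvStep, pvLevels_nil]
    · simp [pvLevelsBrk, pvLevels, h, ih]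

theorem pvLevels_map (arr : List Int) (n : Nat) (g : Int → List Int) :
    ∀ (xs : List Int), pvLevels arr n (xs.map g) = xs.flatMap (fun x => pvLevels arr n [g x]) := by
  intro xs
  induction xs with
  | nil =>
    cases n with
    | zero => rfl
    | succ m => simp [pvLevels_nil]
  | cons x xs ih =>
    have : (x :: xs).map g = [g x] ++ xs.map g := by simp
    rw [this, pvLevels_append, ih]
    simp [List.flatMap]

-- a filter whose predicate fails on some member of the list is strictly shorter
theorem pv_len_filter_lt (L : List Int) (p : Int → Bool) (v : Int)
    (hv : v ∈ L) (hp : p v = false) : (L.filter p).length < L.length := by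
  induction L with
  | nil => cases hv
  | cons a as ih =>
    rw [List.filter_cons]
    by_cases hva : v = a
    · subst hva
      rw [hp]
      simpa using Nat.lt_succ_of_le (List.length_filter_le p as)
    · have hv' : v ∈ as := by
        cases hv with
        | head => exact absurd rfl hva
        | tail _ h => exact h
      have := ih hv'
      by_cases hpa : p a
      · simp only [hpa, if_true, List.length_cons]; omega
      · have hpaf : p a = false := by simpa using hpa
        simp only [hpaf, Bool.false_eq_true, if_false, List.length_cons]; omega

-- the filter of still-unused values strictly shrinks when an unused value is appended to tmp
theorem pvFilter_lt (arr tmp : List Int) (v : Int) (hv : v ∈ arr) (hnv : v ∉ tmp) :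
    (arr.filter (fun x => decide (x ∉ tmp ++ [v]))).length <
      (arr.filter (fun x => decide (x ∉ tmp))).length := by
  have hsplit : arr.filter (fun x => decide (x ∉ tmp ++ [v])) =
      (arr.filter (fun x => decide (x ∉ tmp))).filter (fun x => !(x == v)) := by
    rw [List.filter_filter]
    apply List.filter_congr
    intro x _
    by_cases h1 : x ∈ tmp <;> by_cases h2 : x = v <;> simp [h1, h2]
  rw [hsplit]
  exact pv_len_filter_lt _ _ v (List.mem_filter.mpr ⟨hv, by simp [hnv]⟩) (by simp)

theorem pvBacktrack_gt (num : Int) (arr : List Int) :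
    ∀ (fuel : Nat) (tmp : List Int) (res : List (List Int)),
      num < (tmp.length : Int) → pvBacktrack num arr fuel tmp res = res := by
  intro fuel
  induction fuel with
  | zero => intro tmp res _; rw [pvBacktrack]
  | succ f ih =>
    intro tmp res h
    have hne : ((tmp.length : Int) = num) = False := by simp; omega
    rw [pvBacktrack]
    simp only [hne, if_false]
    have aux : ∀ (vals : List Int) (res : List (List Int)),
        pvBtLoop num arr f tmp vals res = res := by
      intro vals
      induction vals with
      | nil => intro res; rw [pvBtLoop]
      | cons v vs ihv =>
        intro res
        rw [pvBtLoop]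
        by_cases hv : v ∈ tmp
        · simp only [hv, if_true]; exact ihv res
        · simp only [hv, if_false]
          rw [ih (tmp ++ [v]) res (by simp; omega)]
          exact ihv res
    exact aux arr res

theorem pvBacktrack_main (num : Int) (arr : List Int) :
    ∀ (fuel : Nat) (d : Nat) (tmp : List Int) (res : List (List Int)),
      (arr.filter (fun x => decide (x ∉ tmp))).length < fuel →
      (tmp.length : Int) + (d : Int) = num →
      pvBacktrack num arr fuel tmp res = res ++ pvLevels arr d [tmp] := by
  intro fuel
  induction fuel with
  | zero => intro d tmp res hlt _; omega
  | succ f ih =>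
    intro d tmp res hlt hd
    cases d with
    | zero =>
      have hl : ((tmp.length : Int) = num) := by omega
      rw [pvBacktrack]
      simp [hl, pvLevels]
    | succ e =>
      have hne : ((tmp.length : Int) = num) = False := by simp; omega
      rw [pvBacktrack]
      simp only [hne, if_false]
      have aux : ∀ (vals : List Int), (∀ v ∈ vals, v ∈ arr) →
          ∀ (res : List (List Int)),
          pvBtLoop num arr f tmp vals res =
            res ++ (vals.filter (fun v => decide (v ∉ tmp))).flatMap
              (fun v => pvLevels arr e [tmp ++ [v]]) := by
        intro vals
        induction vals with
        | nil => intro _ res; simp [pvBtLoop]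
        | cons v vs ihv =>
          intro hsub res
          have hvarr : v ∈ arr := hsub v (by simp)
          have hsub' : ∀ w ∈ vs, w ∈ arr := fun w hw => hsub w (by simp [hw])
          rw [pvBtLoop]
          by_cases hv : v ∈ tmp
          · simp only [hv, if_true]
            rw [ihv hsub' res]
            simp [hv]
          · simp only [hv, if_false]
            have hflt : (arr.filter (fun x => decide (x ∉ tmp ++ [v]))).length < f := by
              have := pvFilter_lt arr tmp v hvarr hv
              omega
            have hlen : ((tmp ++ [v]).length : Int) + (e : Int) = num := by
              simp; omega
            rw [ih e (tmp ++ [v]) res hflt hlen]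
            rw [ihv hsub' (res ++ pvLevels arr e [tmp ++ [v]])]
            simp [hv, List.flatMap]
      rw [aux arr (fun _ h => h) res]
      have hstep : pvStep arr [tmp] =
          (arr.filter (fun v => decide (v ∉ tmp))).map (fun v => tmp ++ [v]) := by
        simp [pvStep, List.flatMap]
      rw [show pvLevels arr (e + 1) [tmp] = pvLevels arr e (pvStep arr [tmp]) from rfl,
        hstep, pvLevels_map]

-- ===== VERDICT (by name: the statement is the Claim_ definition above) =====
theorem solution_spec : Claim_equal_solution := by
  intro num arr _
  unfold Spec_solution solution solution_alt
  by_cases hneg : num < 0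
  · rw [pvBacktrack_gt num arr (arr.length + 1) [] [] (by simp; omega)]
    simp [hneg, PySem.List.sorted]
  · have h0 : (0 : Int) ≤ num := by omega
    rw [pvBacktrack_main num arr (arr.length + 1) num.toNat [] []
      (by simp)
      (by simp [Int.toNat_of_nonneg h0])]
    simp [hneg, pvLevelsBrk_eq]
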